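-- pv_equiv track=rewrite | github.com/dripbert/gum | gum.py | collect_between_delim
-- ===== SOURCE A (Python) =====
-- def reverse_string(string):
--     rev = ''
--     l = len(string)
--     while l > 0:
--         l -= 1
--         rev += string[l]
--     return rev
--
-- def collect_between_delim(line, delim):
--     line = reverse_string(line)
--     collect = False
--     cont = ''
--     for c in line:
--         if collect:
--             if c == delim[1]:
--                 collect = False
--             if not collect:
--                 return reverse_string(cont)
--             if c not in delim:
--                 cont += c
--         if c == delim[0]:
--             collect = True
-- ===== SOURCE B (Python) =====
-- def collect_between_delim(line, delim):
--     last_close = -1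
--     opened = None  # (index of last delim[0] seen, index of the delim[1] most recently seen before it)
--     for idx, c in enumerate(line):
--         if c == delim[0]:
--             opened = (idx, last_close)
--         if c == delim[1]:
--             last_close = idx
--     if opened is not None:
--         open_pos, close = opened
--         if close != -1:
--             return ''.join(c for c in line[close + 1:open_pos] if c not in delim)
--     return None
-- ===== Notes on version B (the rewrite author's own statement) =====
-- stated objective: faster
-- what changed: Replaces the reverse-the-string-then-scan-with-a-collect-flag algorithm by a single forward indexed pass that records the last open-delimiter position and the closest close-delimiter before it, then produces the result by slicing and filtering the original line.
-- outside the precondition, e.g. on collect_between_delim('xyz', 'a'): A returns None, B raises IndexError; on collect_between_delim('abc', 'z'): A returns None, B raises IndexError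
import Mathlib
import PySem

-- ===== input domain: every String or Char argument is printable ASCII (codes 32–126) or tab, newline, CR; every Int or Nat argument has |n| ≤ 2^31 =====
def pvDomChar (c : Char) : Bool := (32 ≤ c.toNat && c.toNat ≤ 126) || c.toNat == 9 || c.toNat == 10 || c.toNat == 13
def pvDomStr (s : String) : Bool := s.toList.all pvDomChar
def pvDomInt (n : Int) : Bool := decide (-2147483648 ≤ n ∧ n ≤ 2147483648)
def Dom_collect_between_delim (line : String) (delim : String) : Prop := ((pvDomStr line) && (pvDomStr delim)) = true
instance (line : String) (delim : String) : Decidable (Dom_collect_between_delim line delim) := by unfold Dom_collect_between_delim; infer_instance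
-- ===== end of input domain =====

-- B replaces A's reverse-then-scan-with-a-collect-flag by a single forward indexed pass that
-- records the last open-delimiter index and the closest close-delimiter index before it, then
-- slices and filters the original line (no string reversal, no per-character string building).


-- ===== PORT A =====
-- reverse_string: 'while l > 0: l -= 1; rev += string[l]'  (string[l] is always in range here,
-- so getD is exact)
def pvRevLoop (s : List Char) : Nat → List Char → List Char
  | 0, rev => rev
  | l + 1, rev => pvRevLoop s l (rev ++ [s.getD l ' '])

def reverse_string (s : String) : String := String.ofList (pvRevLoop s.toList s.toList.length [])

-- the for-loop of A, with its early return as the `some` result; delim[0]/delim[1] are ported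
-- with getD, exact for delim.length ≥ 2 (Pre_; Python raises IndexError below that)
def pvALoop (d : List Char) : List Char → Bool → List Char → Option String
  | [], _, _ => none
  | c :: rest, collect, cont =>
    if collect then
      let collect1 := if c = d.getD 1 ' ' then false else collect
      if collect1 = false then some (reverse_string (String.ofList cont))
      else
        let cont1 := if ¬ (c ∈ d) then cont ++ [c] else cont
        let collect2 := if c = d.getD 0 ' ' then true else collect1
        pvALoop d rest collect2 cont1
    else
      let collect2 := if c = d.getD 0 ' ' then true else collect
      pvALoop d rest collect2 cont

def collect_between_delim (line : String) (delim : String) : Option String :=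
  pvALoop delim.toList (reverse_string line).toList false []

-- ===== PORT B =====
-- single forward pass with enumerate; delim[0]/delim[1] via getD, exact for delim.length ≥ 2 (Pre_)
def collect_between_delim_alt (line : String) (delim : String) : Option String :=
  let cs := line.toList
  let d := delim.toList
  let st :=
    (PySem.List.enumerate cs).foldl
      (fun (st : Int × Option (Int × Int)) (p : Int × Char) =>
        let opened := if p.2 = d.getD 0 ' ' then some (p.1, st.1) else st.2
        let lastClose := if p.2 = d.getD 1 ' ' then p.1 else st.1
        (lastClose, opened))
      (-1, none)
  match st.2 with
  | none => none
  | some (op, cl) =>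
    if cl ≠ -1 then
      some (String.ofList ((PySem.List.slice cs (some (cl + 1)) (some op)).filter (fun c => ¬ (c ∈ d))))
    else none

-- ===== PRECONDITION & SPEC =====
-- Pre_ excludes delim shorter than 2 characters combined with a nonempty line: there Python A
-- raises IndexError as soon as the scan consults delim[1] (or delim[0], for an empty delim), and
-- where it instead returns None it does so only vacuously because the delimiter check can never
-- fire, while B raises IndexError on every nonempty line.
def Pre_collect_between_delim (line : String) (delim : String) : Prop := 2 ≤ delim.length ∨ line = ""
instance (line : String) (delim : String) : Decidable (Pre_collect_between_delim line delim) := by unfold Pre_collect_between_delim; infer_instance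

def pvWitness_collect_between_delim : String × String := ("a)b(c", "()")

def Spec_collect_between_delim (line : String) (delim : String) (out : Option String) : Prop := out = collect_between_delim_alt line delim
instance (line : String) (delim : String) (out : Option String) : Decidable (Spec_collect_between_delim line delim out) := by unfold Spec_collect_between_delim; infer_instance

-- ===== CLAIM (what is proved, stated in full; the proofs are below) =====
def Claim_equal_collect_between_delim : Prop := ∀ (line : String) (delim : String), Dom_collect_between_delim line delim → Pre_collect_between_delim line delim → Spec_collect_between_delim line delim (collect_between_delim line delim)

-- ===== LEMMAS AND PROOFS =====

theorem pvRevLoop_eq (s : List Char) : ∀ (l : Nat), l ≤ s.length → ∀ (rev : List Char),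
    pvRevLoop s l rev = rev ++ (s.take l).reverse := by
  intro l
  induction l with
  | zero => intro _ rev; simp [pvRevLoop]
  | succ n ih =>
    intro h rev
    have hn : n < s.length := by omega
    rw [pvRevLoop, ih (by omega)]
    have h2 : List.take (n+1) s = List.take n s ++ [s[n]] := by
      rw [← List.take_concat_get (l := s) (i := n) hn]; simp
    rw [h2, List.reverse_append]
    simp [List.getElem?_eq_getElem hn]

theorem reverse_string_eq (s : String) : reverse_string s = String.ofList s.toList.reverse := by
  rw [reverse_string, pvRevLoop_eq s.toList s.toList.length (le_refl _)]
  rw [List.take_of_length_le (le_refl _)]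
  simp

def pvPhase2 (d : List Char) (c1 : Char) : List Char → Option (List Char)
  | [] => none
  | c :: r => if c = c1 then some [] else (pvPhase2 d c1 r).map (fun m => if c ∈ d then m else c :: m)

def pvPhase1 (d : List Char) (c0 c1 : Char) : List Char → Option (List Char)
  | [] => none
  | c :: r => if c = c0 then pvPhase2 d c1 r else pvPhase1 d c0 c1 r

theorem pvALoop_true (d : List Char) : ∀ (r : List Char) (cont : List Char),
    pvALoop d r true cont
      = (pvPhase2 d (d.getD 1 ' ') r).map (fun m => reverse_string (String.ofList (cont ++ m))) := by
  intro r
  induction r with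
  | nil => intro cont; simp [pvALoop, pvPhase2]
  | cons c rest ih =>
    intro cont
    by_cases h1 : c = d[1]?.getD ' '
    · simp [pvALoop, pvPhase2, h1]
    · by_cases hd : c ∈ d
      · simp [pvALoop, pvPhase2, h1, hd, ih]
      · simp [pvALoop, pvPhase2, h1, hd, ih]
        cases pvPhase2 d (d[1]?.getD ' ') rest <;> simp

theorem pvALoop_false (d : List Char) : ∀ (r : List Char) (cont : List Char),
    pvALoop d r false cont
      = (pvPhase1 d (d.getD 0 ' ') (d.getD 1 ' ') r).map
          (fun m => reverse_string (String.ofList (cont ++ m))) := by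
  intro r
  induction r with
  | nil => intro cont; simp [pvALoop, pvPhase1]
  | cons c rest ih =>
    intro cont
    by_cases h0 : c = d[0]?.getD ' '
    · simp [pvALoop, pvPhase1, h0, pvALoop_true]
    · simp [pvALoop, pvPhase1, h0, ih]

def pvShiftClose (c1 : Char) (c : Char) : Option Nat → Option Nat
  | some j => some (j + 1)
  | none => if c = c1 then some 0 else none

def pvLastIdx? (c1 : Char) : List Char → Option Nat
  | [] => none
  | c :: r => pvShiftClose c1 c (pvLastIdx? c1 r)

def pvOpen? (c0 c1 : Char) : List Char → Option (Nat × Option Nat)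
  | [] => none
  | c :: r =>
    match pvOpen? c0 c1 r with
    | some (op, cl) => some (op + 1, pvShiftClose c1 c cl)
    | none => if c = c0 then some (0, none) else none

theorem pvLastIdx?_snoc (c1 : Char) (c : Char) : ∀ (l : List Char),
    pvLastIdx? c1 (l ++ [c]) = if c = c1 then some l.length else pvLastIdx? c1 l := by
  intro l
  induction l with
  | nil => by_cases h : c = c1 <;> simp [pvLastIdx?, pvShiftClose, h]
  | cons x r ih =>
    simp only [List.cons_append, pvLastIdx?, ih]
    by_cases h : c = c1 <;> simp [h, pvShiftClose]

theorem pvOpen?_snoc (c0 c1 : Char) (c : Char) : ∀ (l : List Char),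
    pvOpen? c0 c1 (l ++ [c])
      = if c = c0 then some (l.length, pvLastIdx? c1 l) else pvOpen? c0 c1 l := by
  intro l
  induction l with
  | nil => by_cases h : c = c0 <;> simp [pvOpen?, pvLastIdx?, h]
  | cons x r ih =>
    simp only [List.cons_append, pvOpen?, ih]
    by_cases h : c = c0
    · simp only [h, if_pos rfl]
      cases hr : pvOpen? c0 c1 r <;> simp [pvLastIdx?]
    · simp only [if_neg h]

theorem pvLastIdx?_lt (c1 : Char) : ∀ (l : List Char) (j : Nat),
    pvLastIdx? c1 l = some j → j < l.length := by
  intro l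
  induction l with
  | nil => intro j h; simp [pvLastIdx?] at h
  | cons x r ih =>
    intro j h
    simp only [pvLastIdx?] at h
    cases hr : pvLastIdx? c1 r with
    | some n =>
      rw [hr] at h; simp [pvShiftClose] at h; have := ih n hr; simp [← h]; omega
    | none =>
      rw [hr] at h
      by_cases hx : x = c1 <;> simp [pvShiftClose, hx] at h
      simp [← h]

theorem pvOpen?_bounds (c0 c1 : Char) : ∀ (l : List Char) (op : Nat) (cl : Option Nat),
    pvOpen? c0 c1 l = some (op, cl) → op < l.length ∧ ∀ j, cl = some j → j < op := by
  intro l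
  induction l with
  | nil => intro op cl h; simp [pvOpen?] at h
  | cons x r ih =>
    intro op cl h
    simp only [pvOpen?] at h
    cases hr : pvOpen? c0 c1 r with
    | some p =>
      rw [hr] at h
      obtain ⟨hop, hcl⟩ := ih p.1 p.2 (by rw [hr])
      simp at h
      refine ⟨by simp [← h.1]; omega, ?_⟩
      intro j hj
      rw [← h.2] at hj
      cases hp2 : p.2 with
      | some j' => rw [hp2] at hj; simp [pvShiftClose] at hj; have := hcl j' hp2; omega
      | none =>
        rw [hp2] at hj
        by_cases hx : x = c1 <;> simp [pvShiftClose, hx] at hj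
        omega
    | none =>
      rw [hr] at h
      by_cases hx : x = c0 <;> simp [hx] at h
      refine ⟨by simp [← h.1], ?_⟩
      intro j hj; rw [← h.2] at hj; simp at hj

theorem pvBridge2 (d : List Char) (c1 : Char) : ∀ (r : List Char),
    (match pvLastIdx? c1 r.reverse with
     | none => none
     | some j => some ((r.reverse.drop (j + 1)).filter (fun c => ¬ (c ∈ d))))
    = (pvPhase2 d c1 r).map List.reverse := by
  intro r
  induction r with
  | nil => simp [pvLastIdx?, pvPhase2]
  | cons c rest ih =>
    have hsnoc := pvLastIdx?_snoc c1 c rest.reverse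
    by_cases h1 : c = c1
    · simp only [List.reverse_cons, hsnoc, if_pos h1]
      simp [pvPhase2, h1, List.drop_eq_nil_of_le]
    · simp only [List.reverse_cons, hsnoc, if_neg h1]
      cases hr : pvLastIdx? c1 rest.reverse with
      | none =>
        rw [hr] at ih
        simp only [pvPhase2, if_neg h1]
        cases hp : pvPhase2 d c1 rest with
        | none => simp
        | some m => rw [hp] at ih; simp at ih
      | some j =>
        rw [hr] at ih
        have hj : j < rest.reverse.length := pvLastIdx?_lt c1 _ j hr
        simp only [pvPhase2, if_neg h1]
        cases hp : pvPhase2 d c1 rest with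
        | none => rw [hp] at ih; simp at ih
        | some m =>
          rw [hp] at ih
          simp only [Option.map_some, Option.some.injEq, decide_not] at ih
          have hdrop : (rest.reverse ++ [c]).drop (j + 1) = rest.reverse.drop (j + 1) ++ [c] :=
            List.drop_append_of_le_length (by omega)
          rw [hdrop, List.filter_append]
          by_cases hd : c ∈ d <;> simp [hd, ih]

theorem pvBridge (d : List Char) (c0 c1 : Char) : ∀ (r : List Char),
    (match pvOpen? c0 c1 r.reverse with
     | none => none
     | some (_, none) => none
     | some (op, some j) =>
        some (((r.reverse.drop (j + 1)).take (op - (j + 1))).filter (fun c => ¬ (c ∈ d))))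
    = (pvPhase1 d c0 c1 r).map List.reverse := by
  intro r
  induction r with
  | nil => simp [pvOpen?, pvPhase1]
  | cons c rest ih =>
    have hsnoc := pvOpen?_snoc c0 c1 c rest.reverse
    by_cases h0 : c = c0
    · simp only [List.reverse_cons, hsnoc, if_pos h0]
      simp only [pvPhase1, if_pos h0]
      have hb2 := pvBridge2 d c1 rest
      cases hr : pvLastIdx? c1 rest.reverse with
      | none => rw [hr] at hb2; simp at hb2 ⊢; exact hb2
      | some j =>
        rw [hr] at hb2
        have hj : j < rest.reverse.length := pvLastIdx?_lt c1 _ j hr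
        have hdrop : (rest.reverse ++ [c]).drop (j + 1) = rest.reverse.drop (j + 1) ++ [c] :=
          List.drop_append_of_le_length (by omega)
        simp only [hdrop]
        have hlen : (rest.reverse.drop (j + 1)).length = rest.reverse.length - (j + 1) := by
          simp
        have htake : ((rest.reverse.drop (j + 1)) ++ [c]).take (rest.reverse.length - (j + 1))
            = rest.reverse.drop (j + 1) := by
          rw [← hlen, List.take_left]
        rw [htake]
        exact hb2
    · simp only [List.reverse_cons, hsnoc, if_neg h0]
      simp only [pvPhase1, if_neg h0]
      cases hr : pvOpen? c0 c1 rest.reverse with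
      | none => rw [hr] at ih; exact ih
      | some p =>
        rw [hr] at ih
        obtain ⟨op, cl⟩ := p
        obtain ⟨hop, hcl⟩ := pvOpen?_bounds c0 c1 _ op cl hr
        cases cl with
        | none => exact ih
        | some j =>
          have hj : j < op := hcl j rfl
          have hdrop : (rest.reverse ++ [c]).drop (j + 1) = rest.reverse.drop (j + 1) ++ [c] :=
            List.drop_append_of_le_length (by omega)
          have htake : ((rest.reverse.drop (j + 1)) ++ [c]).take (op - (j + 1))
              = (rest.reverse.drop (j + 1)).take (op - (j + 1)) := by
            apply List.take_append_of_le_length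
            simp only [List.length_drop, List.length_reverse] at hop ⊢
            omega
          simp only [hdrop, htake]
          exact ih

def pvEncI : Option Nat → Int
  | none => -1
  | some n => (n : Int)

theorem pvFold_eq (d : List Char) : ∀ (cs : List Char),
    (PySem.List.enumerate cs).foldl
      (fun (st : Int × Option (Int × Int)) (p : Int × Char) =>
        let opened := if p.2 = d.getD 0 ' ' then some (p.1, st.1) else st.2
        let lastClose := if p.2 = d.getD 1 ' ' then p.1 else st.1
        (lastClose, opened))
      (-1, none)
    = (pvEncI (pvLastIdx? (d.getD 1 ' ') cs),
       (pvOpen? (d.getD 0 ' ') (d.getD 1 ' ') cs).map (fun p => ((p.1 : Int), pvEncI p.2))) := by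
  intro cs
  induction cs using List.reverseRecOn with
  | nil => simp [PySem.List.enumerate, pvLastIdx?, pvOpen?, pvEncI]
  | append_singleton l c ih =>
    rw [PySem.List.enumerate_append, List.foldl_append, ih]
    rw [pvLastIdx?_snoc, pvOpen?_snoc]
    simp only [PySem.List.enumerate, List.foldl]
    by_cases h0 : c = d[0]?.getD ' ' <;> by_cases h1 : c = d[1]?.getD ' '
    · have heq : d[0]?.getD ' ' = d[1]?.getD ' ' := by rw [← h0, ← h1]
      simp [h0, h1, heq, pvEncI, pvShiftClose]
    · have hne : ¬ d[0]?.getD ' ' = d[1]?.getD ' ' := by rw [← h0]; exact h1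
      simp [h0, h1, hne, pvEncI, pvShiftClose]
    · have hne : ¬ d[1]?.getD ' ' = d[0]?.getD ' ' := by rw [← h1]; exact fun hh => h0 hh
      simp [h0, h1, hne, pvEncI, pvShiftClose]
    · simp [h0, h1, pvEncI, pvShiftClose]

theorem collect_eq (line : String) (delim : String) :
    collect_between_delim line delim = collect_between_delim_alt line delim := by
  have hA : collect_between_delim line delim
      = (pvPhase1 delim.toList (delim.toList.getD 0 ' ') (delim.toList.getD 1 ' ')
            line.toList.reverse).map (fun m => String.ofList m.reverse) := by
    rw [collect_between_delim, reverse_string_eq]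
    rw [pvALoop_false]
    simp [reverse_string_eq]
  have hF := pvFold_eq delim.toList line.toList
  have hB := pvBridge delim.toList (delim.toList.getD 0 ' ') (delim.toList.getD 1 ' ')
      line.toList.reverse
  rw [List.reverse_reverse] at hB
  rw [hA, collect_between_delim_alt]
  simp only [hF]
  cases ho : pvOpen? (delim.toList.getD 0 ' ') (delim.toList.getD 1 ' ') line.toList with
  | none =>
    rw [ho] at hB
    simp only at hB
    cases hp : pvPhase1 delim.toList (delim.toList.getD 0 ' ') (delim.toList.getD 1 ' ')
        line.toList.reverse with
    | none => simp [hp]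
    | some m => rw [hp] at hB; simp at hB
  | some p =>
    obtain ⟨op, cl⟩ := p
    rw [ho] at hB
    cases cl with
    | none =>
      simp only at hB
      cases hp : pvPhase1 delim.toList (delim.toList.getD 0 ' ') (delim.toList.getD 1 ' ')
          line.toList.reverse with
      | none => simp [hp, pvEncI]
      | some m => rw [hp] at hB; simp at hB
    | some j =>
      simp only at hB
      have hslice : PySem.List.slice line.toList (some ((j : Int) + 1)) (some ((op : Nat) : Int))
          = (line.toList.drop (j + 1)).take (op - (j + 1)) := by
        have hcast : ((j : Int) + 1) = (((j + 1 : Nat)) : Int) := by push_cast; ring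
        rw [hcast, PySem.List.slice_natCast]
      cases hp : pvPhase1 delim.toList (delim.toList.getD 0 ' ') (delim.toList.getD 1 ' ')
          line.toList.reverse with
      | none => rw [hp] at hB; simp at hB
      | some m =>
        rw [hp] at hB
        simp only [Option.map_some, Option.some.injEq, decide_not] at hB
        have hne : ((j : Nat) : Int) ≠ -1 := by omega
        simp [hp, pvEncI, hne, hslice, hB]

-- ===== VERDICT (by name: the statement is the Claim_ definition above) =====
theorem collect_between_delim_spec : Claim_equal_collect_between_delim := by
  intro line delim _ _
  unfold Spec_collect_between_delim
  exact collect_eq line delim
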